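-- pv_equiv track=rewrite | github.com/Choeng-Rayu/cyber_project_T1Y3 | finalized/anti_malicious.py | get_threat_level
-- ===== SOURCE A (Python) =====
-- def get_threat_level(patterns):
--     """Determine threat level based on detected patterns"""
--     critical_patterns = ['KNOWN_MALWARE_SIGNATURE', 'MALICIOUS_EMAIL_FOUND', 'MALICIOUS_URL']
--     high_patterns = ['encrypt_folder', 'disable_defender', 'add_to_startup', 'send_to_backend']
--
--     for p in patterns:
--         if any(cp in str(p) for cp in critical_patterns):
--             return "CRITICAL"
--
--     for p in patterns:
--         if any(hp in str(p) for hp in high_patterns):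
--             return "HIGH"
--
--     return "MEDIUM"
-- ===== SOURCE B (Python) =====
-- def get_threat_level(patterns):
--     """Determine threat level based on detected patterns"""
--     critical_patterns = ['KNOWN_MALWARE_SIGNATURE', 'MALICIOUS_EMAIL_FOUND', 'MALICIOUS_URL']
--     high_patterns = ['encrypt_folder', 'disable_defender', 'add_to_startup', 'send_to_backend']
--
--     high_found = False
--     for p in patterns:
--         s = str(p)
--         if any(cp in s for cp in critical_patterns):
--             return "CRITICAL"
--         if not high_found and any(hp in s for hp in high_patterns):
--             high_found = True
--     return "HIGH" if high_found else "MEDIUM"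
-- ===== Notes on version B (the rewrite author's own statement) =====
-- stated objective: alternative
-- what changed: Replaces A's two sequential full scans (critical pass, then high pass) with a single pass that returns CRITICAL immediately and maintains a high_found flag, deciding HIGH/MEDIUM after the loop.
import Mathlib
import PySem

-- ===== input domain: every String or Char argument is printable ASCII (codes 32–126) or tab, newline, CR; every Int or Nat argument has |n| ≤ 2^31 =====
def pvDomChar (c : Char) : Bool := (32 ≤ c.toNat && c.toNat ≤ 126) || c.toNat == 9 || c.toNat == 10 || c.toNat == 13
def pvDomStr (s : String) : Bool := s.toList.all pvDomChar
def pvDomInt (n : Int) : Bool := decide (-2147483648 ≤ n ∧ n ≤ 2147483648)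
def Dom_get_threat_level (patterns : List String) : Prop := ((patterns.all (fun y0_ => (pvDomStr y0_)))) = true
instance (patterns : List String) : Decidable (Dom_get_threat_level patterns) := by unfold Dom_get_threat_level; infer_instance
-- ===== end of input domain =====

-- B: one pass maintaining a high_found flag instead of A's two sequential scans (same results, same cost).
-- str(p) on a str is the identity, so both ports use p directly.
-- ===== PORT A =====
def pvCritical : List String := ["KNOWN_MALWARE_SIGNATURE", "MALICIOUS_EMAIL_FOUND", "MALICIOUS_URL"]
def pvHigh : List String := ["encrypt_folder", "disable_defender", "add_to_startup", "send_to_backend"]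

-- first for-loop of A: early-returns "CRITICAL"
def aScan1 : List String → Option String
  | [] => none
  | p :: rest =>
    if pvCritical.any (fun cp => PySem.Str.isIn cp p) then some "CRITICAL" else aScan1 rest

-- second for-loop of A: early-returns "HIGH"
def aScan2 : List String → Option String
  | [] => none
  | p :: rest =>
    if pvHigh.any (fun hp => PySem.Str.isIn hp p) then some "HIGH" else aScan2 rest

def get_threat_level (patterns : List String) : String :=
  match aScan1 patterns with
  | some r => r
  | none =>
    match aScan2 patterns with
    | some r => r
    | none => "MEDIUM"

-- ===== PORT B =====
-- single loop with the high_found flag ('if not high_found and …' ≡ flag ∨ match)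
def bLoop : List String → Bool → String
  | [], high_found => if high_found then "HIGH" else "MEDIUM"
  | p :: rest, high_found =>
    if pvCritical.any (fun cp => PySem.Str.isIn cp p) then "CRITICAL"
    else bLoop rest (high_found || pvHigh.any (fun hp => PySem.Str.isIn hp p))

def get_threat_level_alt (patterns : List String) : String :=
  bLoop patterns false

-- ===== PRECONDITION & SPEC =====
def Spec_get_threat_level (patterns : List String) (out : String) : Prop := out = get_threat_level_alt patterns
instance (patterns : List String) (out : String) : Decidable (Spec_get_threat_level patterns out) := by unfold Spec_get_threat_level; infer_instance

-- ===== CLAIM (what is proved, stated in full; the proofs are below) =====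
def Claim_equal_get_threat_level : Prop := ∀ (patterns : List String), Dom_get_threat_level patterns → Spec_get_threat_level patterns (get_threat_level patterns)

-- ===== LEMMAS AND PROOFS =====
-- loop invariant: bLoop with an arbitrary flag equals A's answer with the flag short-circuiting HIGH
theorem bLoop_eq (patterns : List String) (flag : Bool) :
    bLoop patterns flag =
      match aScan1 patterns with
      | some r => r
      | none =>
        if flag then "HIGH" else
          match aScan2 patterns with
          | some r => r
          | none => "MEDIUM" := by
  induction patterns generalizing flag with
  | nil => cases flag <;> rfl
  | cons p rest ih =>
    simp only [bLoop, aScan1, aScan2]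
    by_cases hc : (pvCritical.any fun cp => PySem.Str.isIn cp p) = true
    · rw [if_pos hc, if_pos hc]
    · rw [if_neg hc, if_neg hc, ih]
      cases aScan1 rest with
      | some r => rfl
      | none =>
        cases flag <;> cases hb : (pvHigh.any fun hp => PySem.Str.isIn hp p) <;> simp only [hb] <;> rfl

-- ===== VERDICT (by name: the statement is the Claim_ definition above) =====
theorem get_threat_level_spec : Claim_equal_get_threat_level := by
  intro patterns _
  unfold Spec_get_threat_level get_threat_level get_threat_level_alt
  rw [bLoop_eq]
  cases aScan1 patterns <;> rfl
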